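-- pv_equiv track=rewrite | github.com/DaniDelHoyo/TFG-Code | add_all_children.py | recursive_children
-- ===== SOURCE A (Python) =====
-- def recursive_children(go_list,chil_dic):
--     '''Return a list with all children of all go terms in a list
--     '''
--     children=[]
--     for go in go_list:
--         if go in chil_dic:
--             children+=chil_dic[go]
--         else:
--             pass
--
--     if len(children)>0:
--         go_list+=recursive_children(children,chil_dic)
--
--     return go_list
-- ===== SOURCE B (Python) =====
-- def recursive_children(go_list, chil_dic):
--     '''Return a list with all children of all go terms in a list
--     '''
--     # Two staged passes: first collect the successive generations of children,
--     # then extend go_list in place (as A does) with all of them.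
--     levels = []
--     frontier = go_list
--     while frontier:
--         frontier = [c for go in frontier for c in chil_dic.get(go, [])]
--         levels.append(frontier)
--     for lvl in levels:
--         go_list += lvl
--     return go_list
-- ===== Notes on version B (the rewrite author's own statement) =====
-- stated objective: alternative
-- what changed: Replaces A's recursive self-call with two staged passes: a loop that collects the successive generations of children (each generation built by a flattening comprehension over dict.get instead of A's membership-test-and-extend loop), followed by a second pass that extends go_list with all collected generations.
import Mathlib
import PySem

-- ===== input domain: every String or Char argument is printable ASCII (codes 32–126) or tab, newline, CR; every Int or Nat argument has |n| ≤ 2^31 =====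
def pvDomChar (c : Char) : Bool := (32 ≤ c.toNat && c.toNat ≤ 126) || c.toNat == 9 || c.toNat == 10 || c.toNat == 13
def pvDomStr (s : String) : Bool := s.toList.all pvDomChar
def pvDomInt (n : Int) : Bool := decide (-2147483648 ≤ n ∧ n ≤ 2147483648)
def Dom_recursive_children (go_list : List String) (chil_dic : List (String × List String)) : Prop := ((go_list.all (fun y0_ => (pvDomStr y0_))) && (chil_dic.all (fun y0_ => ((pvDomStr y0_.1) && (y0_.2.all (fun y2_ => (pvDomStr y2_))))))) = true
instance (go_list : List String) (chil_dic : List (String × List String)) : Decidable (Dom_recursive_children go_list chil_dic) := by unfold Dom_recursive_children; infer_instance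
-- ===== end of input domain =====

-- B replaces A's recursion with two staged passes (collect the child generations, then extend);
-- equivalence is about the returned value (both programs extend go_list in place identically).

-- ===== PORT A =====
-- A's inner for-loop: children = []; for go in go_list: if go in chil_dic: children += chil_dic[go]
def childrenOfA (chil_dic : List (String × List String)) (go_list : List String) : List String :=
  go_list.foldl
    (fun children go =>
      if ((PySem.Dict.mk chil_dic).get? go).isSome then
        children ++ (PySem.Dict.mk chil_dic).getD go []
      else children)
    []

-- A's recursion, made total with fuel (one unit per recursive call; chil_dic.length + 1 levels
-- always suffice when no cycle is reachable from go_list, i.e. whenever the Python returns)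
def recursive_children_go (fuel : Nat) (go_list : List String) (chil_dic : List (String × List String)) : List String :=
  match fuel with
  | 0 => go_list
  | n + 1 =>
    let children := childrenOfA chil_dic go_list
    if children.length > 0 then go_list ++ recursive_children_go n children chil_dic
    else go_list

def recursive_children (go_list : List String) (chil_dic : List (String × List String)) : List String :=
  recursive_children_go (chil_dic.length + 1) go_list chil_dic

-- ===== PORT B =====
-- B's per-generation comprehension: [c for go in frontier for c in chil_dic.get(go, [])]
def frontierChildrenB (chil_dic : List (String × List String)) (frontier : List String) : List String :=
  frontier.flatMap (fun go => (PySem.Dict.mk chil_dic).getD go [])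

-- B's first pass (while frontier: frontier = …; levels.append(frontier)), fueled like A
def collectLevelsB (chil_dic : List (String × List String)) : Nat → List String → List (List String)
  | 0, _ => []
  | n + 1, frontier =>
    if frontier.isEmpty then []
    else
      let f := frontierChildrenB chil_dic frontier
      f :: collectLevelsB chil_dic n f

-- B's second pass: for lvl in levels: go_list += lvl
def recursive_children_alt (go_list : List String) (chil_dic : List (String × List String)) : List String :=
  (collectLevelsB chil_dic (chil_dic.length + 1) go_list).foldl (fun acc lvl => acc ++ lvl) go_list

-- ===== PRECONDITION & SPEC =====
-- helpers for Pre_: saturated reachability in the child graph of chil_dic (a property of the input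
-- graph, independent of either port's algorithm)
def pvReachStep (chil_dic : List (String × List String)) (s : List String) : List String :=
  PySem.List.dedup (s ++ s.flatMap (fun g => (PySem.Dict.mk chil_dic).getD g []))

def pvReach (chil_dic : List (String × List String)) (n : Nat) (s : List String) : List String :=
  match n with
  | 0 => s
  | m + 1 => pvReach chil_dic m (pvReachStep chil_dic s)

def pvReachFuel (go_list : List String) (chil_dic : List (String × List String)) : Nat :=
  (go_list ++ chil_dic.flatMap (fun p => p.2)).length + 1

-- Pre_ excludes exactly the inputs from which a cycle of the child graph is reachable: there the
-- Python A recurses forever (RecursionError), returning no value.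
def Pre_recursive_children (go_list : List String) (chil_dic : List (String × List String)) : Prop :=
  ∀ x ∈ pvReach chil_dic (pvReachFuel go_list chil_dic) go_list,
    x ∉ pvReach chil_dic (pvReachFuel go_list chil_dic) ((PySem.Dict.mk chil_dic).getD x [])

instance (go_list : List String) (chil_dic : List (String × List String)) : Decidable (Pre_recursive_children go_list chil_dic) := by
  unfold Pre_recursive_children; infer_instance

def pvWitness_recursive_children : List String × (List (String × List String)) :=
  (["a"], [("a", ["b", "c"]), ("b", ["d"])])

def Spec_recursive_children (go_list : List String) (chil_dic : List (String × List String)) (out : List String) : Prop := out = recursive_children_alt go_list chil_dic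
instance (go_list : List String) (chil_dic : List (String × List String)) (out : List String) : Decidable (Spec_recursive_children go_list chil_dic out) := by unfold Spec_recursive_children; infer_instance

-- ===== CLAIM (what is proved, stated in full; the proofs are below) =====
def Claim_equal_recursive_children : Prop := ∀ (go_list : List String) (chil_dic : List (String × List String)), Dom_recursive_children go_list chil_dic → Pre_recursive_children go_list chil_dic → Spec_recursive_children go_list chil_dic (recursive_children go_list chil_dic)

-- ===== LEMMAS AND PROOFS =====

-- A's membership-test loop computes the same list as B's flattening comprehension
theorem childrenOfA_eq (chil_dic : List (String × List String)) (l : List String) :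
    childrenOfA chil_dic l = frontierChildrenB chil_dic l := by
  unfold childrenOfA frontierChildrenB
  have h : ∀ (acc : List String),
      l.foldl
        (fun children go =>
          if ((PySem.Dict.mk chil_dic).get? go).isSome then
            children ++ (PySem.Dict.mk chil_dic).getD go []
          else children) acc
      = l.foldl (fun children go => children ++ (PySem.Dict.mk chil_dic).getD go []) acc := by
    induction l with
    | nil => intro acc; rfl
    | cons g t ih =>
      intro acc
      simp only [List.foldl_cons]
      rw [ih]
      congr 1
      cases hg : (PySem.Dict.mk chil_dic).get? g with
      | some v => simp [hg]
      | none => simp [PySem.Dict.getD_eq_get?_getD, hg]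
  rw [h, PySem.List.foldl_append_eq_flatMap]
  simp

-- the common tail of A's result: concatenation of the successive child generations
def pvTailA (chil_dic : List (String × List String)) (n : Nat) (lvl : List String) : List String :=
  match n with
  | 0 => []
  | m + 1 =>
    let c := childrenOfA chil_dic lvl
    if c.length > 0 then c ++ pvTailA chil_dic m c else []

theorem goA_eq (chil_dic : List (String × List String)) :
    ∀ (n : Nat) (lvl : List String),
      recursive_children_go n lvl chil_dic = lvl ++ pvTailA chil_dic n lvl := by
  intro n
  induction n with
  | zero => intro lvl; simp [recursive_children_go, pvTailA]
  | succ m ih =>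
    intro lvl
    simp only [recursive_children_go, pvTailA]
    split
    · rw [ih]
    · simp

theorem collectLevels_nil (chil_dic : List (String × List String)) (n : Nat) :
    collectLevelsB chil_dic n [] = [] := by
  cases n <;> simp [collectLevelsB]

theorem flatten_collect_eq (chil_dic : List (String × List String)) :
    ∀ (n : Nat) (front : List String), front ≠ [] →
      (collectLevelsB chil_dic n front).flatten = pvTailA chil_dic n front := by
  intro n
  induction n with
  | zero => intro front _; simp [collectLevelsB, pvTailA]
  | succ m ih =>
    intro front hf
    have hne : front.isEmpty = false := by simp [hf]
    simp only [collectLevelsB, pvTailA, hne, Bool.false_eq_true, if_false]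
    by_cases hc : frontierChildrenB chil_dic front = []
    · have hcA : childrenOfA chil_dic front = [] := by rw [childrenOfA_eq]; exact hc
      simp [hc, hcA, collectLevels_nil]
    · have hcA : childrenOfA chil_dic front ≠ [] := by rw [childrenOfA_eq]; exact hc
      simp only [List.flatten_cons, ih _ hc, childrenOfA_eq,
        if_pos (List.length_pos_of_ne_nil hc)]

-- ===== VERDICT (by name: the statement is the Claim_ definition above) =====
theorem recursive_children_spec : Claim_equal_recursive_children := by
  intro go_list chil_dic _ _
  unfold Spec_recursive_children recursive_children recursive_children_alt
  rw [PySem.List.foldl_append_eq_flatten, goA_eq]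
  by_cases hg : go_list = []
  · subst hg
    simp [collectLevels_nil, pvTailA, childrenOfA]
  · rw [flatten_collect_eq chil_dic _ _ hg]
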